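-- pv_equiv track=rewrite | github.com/musikalkemist/generativemusicaicourse | Code/markovchain.py | _choose_voice_pitch
-- ===== SOURCE A (Python) =====
-- def _choose_voice_pitch(
--     candidates,
--     target_midi,
--     prev_midi=None,
--     max_jump=7,
--     lower_bound=None,
--     upper_bound=None,
-- ):
--     if not candidates:
--         return int(max(0, min(127, target_midi)))
--
--     filtered = candidates
--     if lower_bound is not None:
--         filtered = [m for m in filtered if m >= int(lower_bound)]
--     if upper_bound is not None:
--         filtered = [m for m in filtered if m <= int(upper_bound)]
--     if not filtered:
--         filtered = candidates
--
--     if prev_midi is not None: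
--         local = [m for m in filtered if abs(m - int(prev_midi)) <= int(max_jump)]
--         if local:
--             filtered = local
--
--     return int(min(filtered, key=lambda m: abs(m - int(target_midi))))
-- ===== SOURCE B (Python) =====
-- def _choose_voice_pitch(
--     candidates,
--     target_midi,
--     prev_midi=None,
--     max_jump=7,
--     lower_bound=None,
--     upper_bound=None,
-- ):
--     if not candidates:
--         return int(max(0, min(127, target_midi)))
--
--     t = int(target_midi)
--
--     def priority(m):
--         bounds_violation = (lower_bound is not None and m < int(lower_bound)) or (
--             upper_bound is not None and m > int(upper_bound)
--         )
--         jump_violation = prev_midi is not None and abs(m - int(prev_midi)) > int(max_jump)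
--         return (bounds_violation, jump_violation, abs(m - t))
--
--     return int(min(candidates, key=priority))
-- ===== Notes on version B (the rewrite author's own statement) =====
-- stated objective: alternative
-- what changed: Replaces A's sequential filter-with-fallback passes (bounds filter, revert-if-empty, jump filter, keep-if-empty) by a single argmin over all candidates under a lexicographic priority tuple (bounds_violation, jump_violation, distance to target).
import Mathlib
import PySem

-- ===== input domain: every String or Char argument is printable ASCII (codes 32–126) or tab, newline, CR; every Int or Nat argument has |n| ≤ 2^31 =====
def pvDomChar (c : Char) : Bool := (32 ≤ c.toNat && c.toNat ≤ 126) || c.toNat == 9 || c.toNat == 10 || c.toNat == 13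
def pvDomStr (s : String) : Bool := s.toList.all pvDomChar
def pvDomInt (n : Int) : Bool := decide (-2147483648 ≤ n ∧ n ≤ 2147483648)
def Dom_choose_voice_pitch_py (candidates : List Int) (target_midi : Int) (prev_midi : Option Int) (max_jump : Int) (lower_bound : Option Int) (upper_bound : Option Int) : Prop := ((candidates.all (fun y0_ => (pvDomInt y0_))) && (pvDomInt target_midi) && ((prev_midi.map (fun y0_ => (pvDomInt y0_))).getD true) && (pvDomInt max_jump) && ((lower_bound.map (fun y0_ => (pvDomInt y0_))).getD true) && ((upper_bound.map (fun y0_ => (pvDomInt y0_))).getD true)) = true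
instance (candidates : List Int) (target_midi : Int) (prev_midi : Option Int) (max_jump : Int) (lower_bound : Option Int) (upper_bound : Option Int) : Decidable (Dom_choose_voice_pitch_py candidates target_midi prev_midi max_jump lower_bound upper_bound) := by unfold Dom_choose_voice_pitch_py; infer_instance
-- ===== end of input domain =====

-- B replaces A's sequential filter-and-fallback passes by one argmin over all candidates
-- under a lexicographic priority tuple (bounds violation, jump violation, distance to target);
-- same cost, different decomposition.

-- ===== PORT A =====
-- A's bounds filtering: filter by lower bound (if given), then by upper bound (if given).
def pvAFilterBounds (candidates : List Int) (lower_bound upper_bound : Option Int) : List Int :=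
  let f1 : List Int :=
    match lower_bound with
    | some lb => candidates.filter (fun m => decide (lb ≤ m))
    | none => candidates
  match upper_bound with
  | some ub => f1.filter (fun m => decide (m ≤ ub))
  | none => f1

-- A's jump filtering: keep pitches within max_jump of prev_midi, falling back to the input
-- list if none qualifies.
def pvAFilterJump (filtered : List Int) (prev_midi : Option Int) (max_jump : Int) : List Int :=
  match prev_midi with
  | some p =>
    let loc := filtered.filter (fun m => decide (|m - p| ≤ max_jump))
    if loc.isEmpty then filtered else loc
  | none => filtered

def choose_voice_pitch_py (candidates : List Int) (target_midi : Int) (prev_midi : Option Int) (max_jump : Int) (lower_bound : Option Int) (upper_bound : Option Int) : Int :=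
  if candidates.isEmpty then max 0 (min 127 target_midi)
  else
    let f2 := pvAFilterBounds candidates lower_bound upper_bound
    let f3 := if f2.isEmpty then candidates else f2
    let f4 := pvAFilterJump f3 prev_midi max_jump
    match PySem.List.min? f4 (fun m => |m - target_midi|) with
    | some v => v
    | none => 0  -- unreachable: f4 is nonempty whenever candidates is

-- ===== PORT B =====
-- bounds_violation component of Source B's priority tuple
def pvBV (lower_bound upper_bound : Option Int) (m : Int) : Bool :=
  (match lower_bound with | some lb => decide (m < lb) | none => false) ||
  (match upper_bound with | some ub => decide (ub < m) | none => false)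

-- jump_violation component of Source B's priority tuple
def pvJV (prev_midi : Option Int) (max_jump : Int) (m : Int) : Bool :=
  match prev_midi with
  | some p => decide (max_jump < |m - p|)
  | none => false

-- Source B's priority(m) tuple (bools compare as Python ints: False < True)
def pvPriority (target_midi : Int) (prev_midi : Option Int) (max_jump : Int) (lower_bound upper_bound : Option Int) (m : Int) : Bool × Bool × Nat :=
  (pvBV lower_bound upper_bound m, pvJV prev_midi max_jump m, (m - target_midi).natAbs)

-- Python's lexicographic `<` on the priority triples (Mathlib's `<` on products is
-- pointwise, so the comparison is written out explicitly).
def pvTupLt (a b : Bool × Bool × Nat) : Bool :=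
  (!a.1 && b.1) || ((a.1 == b.1) && ((!a.2.1 && b.2.1) || ((a.2.1 == b.2.1) && decide (a.2.2 < b.2.2))))

-- min(candidates, key=priority): first element with lexicographically minimal priority
def choose_voice_pitch_py_alt (candidates : List Int) (target_midi : Int) (prev_midi : Option Int) (max_jump : Int) (lower_bound : Option Int) (upper_bound : Option Int) : Int :=
  match candidates with
  | [] => max 0 (min 127 target_midi)
  | h :: t =>
    t.foldl (fun best m =>
      if pvTupLt (pvPriority target_midi prev_midi max_jump lower_bound upper_bound m)
                 (pvPriority target_midi prev_midi max_jump lower_bound upper_bound best)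
      then m else best) h

-- ===== PRECONDITION & SPEC =====
def Spec_choose_voice_pitch_py (candidates : List Int) (target_midi : Int) (prev_midi : Option Int) (max_jump : Int) (lower_bound : Option Int) (upper_bound : Option Int) (out : Int) : Prop := out = choose_voice_pitch_py_alt candidates target_midi prev_midi max_jump lower_bound upper_bound
instance (candidates : List Int) (target_midi : Int) (prev_midi : Option Int) (max_jump : Int) (lower_bound : Option Int) (upper_bound : Option Int) (out : Int) : Decidable (Spec_choose_voice_pitch_py candidates target_midi prev_midi max_jump lower_bound upper_bound out) := by unfold Spec_choose_voice_pitch_py; infer_instance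

-- ===== CLAIM (what is proved, stated in full; the proofs are below) =====
def Claim_equal_choose_voice_pitch_py : Prop := ∀ (candidates : List Int) (target_midi : Int) (prev_midi : Option Int) (max_jump : Int) (lower_bound : Option Int) (upper_bound : Option Int), Dom_choose_voice_pitch_py candidates target_midi prev_midi max_jump lower_bound upper_bound → Spec_choose_voice_pitch_py candidates target_midi prev_midi max_jump lower_bound upper_bound (choose_voice_pitch_py candidates target_midi prev_midi max_jump lower_bound upper_bound)

-- ===== LEMMAS AND PROOFS =====
-- "first minimal" fold: Python's min(…, key=…) loop shape
def mfold (lt : Int → Int → Bool) (a : Int) (l : List Int) : Int :=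
  l.foldl (fun b m => if lt m b then m else b) a

-- the distance comparison (Nat form, as in B)
def pvLtD (T : Int) (m b : Int) : Bool := decide ((m - T).natAbs < (b - T).natAbs)

-- lexicographic comparison on the (jump_violation, distance) suffix of the priority tuple
def pvLtJ (T : Int) (P : Option Int) (MJ : Int) (m b : Int) : Bool :=
  (!pvJV P MJ m && pvJV P MJ b) || ((pvJV P MJ m == pvJV P MJ b) && pvLtD T m b)

theorem mfold_cons (lt : Int → Int → Bool) (a x : Int) (s : List Int) :
    mfold lt a (x :: s) = mfold lt (if lt x a then x else a) s := rfl

theorem mfold_congr (lt1 lt2 : Int → Int → Bool) (hpt : ∀ m b, lt1 m b = lt2 m b) :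
    ∀ (l : List Int) (a : Int), mfold lt1 a l = mfold lt2 a l := by
  intro l
  induction l with
  | nil => intro a; rfl
  | cons x s ih =>
    intro a
    rw [mfold_cons, mfold_cons, hpt x a]
    exact ih _

theorem min?_cons (key : Int → Int) :
    ∀ (t : List Int) (h : Int),
      PySem.List.min? (h :: t) key = some (mfold (fun m b => decide (key m < key b)) h t) := by
  intro t
  induction t with
  | nil => intro h; rfl
  | cons x s ih =>
    intro h
    have e1 : PySem.List.min? (h :: x :: s) key
        = PySem.List.min? ((if key x < key h then x else h) :: s) key := by
      simp only [PySem.List.min?, List.foldl_cons]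
      by_cases hx : key x < key h
      · simp [hx]
      · simp [hx]
    rw [e1, ih]
    rw [mfold_cons]
    by_cases hx : key x < key h
    · rw [if_pos hx, if_pos (by simpa using hx)]
    · rw [if_neg hx, if_neg (by simpa using hx)]

-- good accumulator: bad elements never win, good ones compare by lt2
theorem stageG (good : Int → Bool) (lt2 ltL : Int → Int → Bool)
    (h11 : ∀ m b, good m = true → good b = true → ltL m b = lt2 m b)
    (h01 : ∀ m b, good m = false → good b = true → ltL m b = false) :
    ∀ (l : List Int) (a : Int), good a = true →
      mfold ltL a l = mfold lt2 a (l.filter good) := by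
  intro l
  induction l with
  | nil => intro a _; rfl
  | cons x s ih =>
    intro a ha
    by_cases hx : good x = true
    · rw [List.filter_cons_of_pos hx, mfold_cons, mfold_cons, h11 x a hx ha]
      by_cases hlt : lt2 x a = true
      · rw [if_pos hlt]; exact ih x hx
      · rw [if_neg hlt]; exact ih a ha
    · have hx' : good x = false := by simpa using hx
      rw [List.filter_cons_of_neg (by simp [hx']), mfold_cons, h01 x a hx' ha,
        if_neg Bool.false_ne_true]
      exact ih a ha

-- bad accumulator: bads compare by lt2 until the first good element takes over
theorem stageB (good : Int → Bool) (lt2 ltL : Int → Int → Bool)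
    (h11 : ∀ m b, good m = true → good b = true → ltL m b = lt2 m b)
    (h01 : ∀ m b, good m = false → good b = true → ltL m b = false)
    (h10 : ∀ m b, good m = true → good b = false → ltL m b = true)
    (h00 : ∀ m b, good m = false → good b = false → ltL m b = lt2 m b) :
    ∀ (l : List Int) (a : Int), good a = false →
      mfold ltL a l = (match l.filter good with
        | [] => mfold lt2 a l
        | g :: r => mfold lt2 g r) := by
  intro l
  induction l with
  | nil => intro a _; rfl
  | cons x s ih =>
    intro a ha
    by_cases hx : good x = true
    · rw [List.filter_cons_of_pos hx, mfold_cons, h10 x a hx ha, if_pos rfl]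
      exact stageG good lt2 ltL h11 h01 s x hx
    · have hx' : good x = false := by simpa using hx
      rw [List.filter_cons_of_neg (by simp [hx'])]
      rw [mfold_cons, mfold_cons, h00 x a hx' ha]
      by_cases hlt : lt2 x a = true
      · rw [if_pos hlt]
        have := ih x hx'
        cases hfs : s.filter good with
        | nil => rw [hfs] at this; simpa [hfs] using this
        | cons g r => rw [hfs] at this; simpa [hfs] using this
      · rw [if_neg hlt]
        have := ih a ha
        cases hfs : s.filter good with
        | nil => rw [hfs] at this; simpa [hfs] using this
        | cons g r => rw [hfs] at this; simpa [hfs] using this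

theorem stageMain (good : Int → Bool) (lt2 ltL : Int → Int → Bool)
    (h11 : ∀ m b, good m = true → good b = true → ltL m b = lt2 m b)
    (h01 : ∀ m b, good m = false → good b = true → ltL m b = false)
    (h10 : ∀ m b, good m = true → good b = false → ltL m b = true)
    (h00 : ∀ m b, good m = false → good b = false → ltL m b = lt2 m b) :
    ∀ (h : Int) (t : List Int),
      mfold ltL h t = (match (h :: t).filter good with
        | [] => mfold lt2 h t
        | g :: r => mfold lt2 g r) := by
  intro h t
  by_cases hh : good h = true
  · rw [List.filter_cons_of_pos hh]
    exact stageG good lt2 ltL h11 h01 t h hh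
  · have hh' : good h = false := by simpa using hh
    rw [List.filter_cons_of_neg (by simp [hh'])]
    exact stageB good lt2 ltL h11 h01 h10 h00 t h hh'

-- |m - T| < |b - T| on Int agrees with the natAbs comparison
theorem ltD_int_eq (T m b : Int) :
    decide (|m - T| < |b - T|) = pvLtD T m b := by
  simp only [pvLtD]
  apply decide_eq_decide.mpr
  rw [Int.abs_eq_natAbs, Int.abs_eq_natAbs]
  omega

-- A's jump stage + final min equals the (jump, distance)-lex fold
theorem jumpStage (T : Int) (P : Option Int) (MJ : Int) (g : Int) (r : List Int) :
    (match PySem.List.min? (pvAFilterJump (g :: r) P MJ) (fun m => |m - T|) with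
      | some v => v
      | none => 0) = mfold (pvLtJ T P MJ) g r := by
  cases P with
  | none =>
    rw [show pvAFilterJump (g :: r) none MJ = g :: r from rfl, min?_cons]
    show mfold (fun m b => decide (|m - T| < |b - T|)) g r = _
    exact mfold_congr _ _ (fun m b => by rw [ltD_int_eq]; simp [pvLtJ, pvJV, pvLtD]) r g
  | some p =>
    have h11 : ∀ m b, (!pvJV (some p) MJ m) = true → (!pvJV (some p) MJ b) = true →
        pvLtJ T (some p) MJ m b = pvLtD T m b := by
      intro m b hm hb; simp at hm hb; simp [pvLtJ, hm, hb]
    have h01 : ∀ m b, (!pvJV (some p) MJ m) = false → (!pvJV (some p) MJ b) = true →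
        pvLtJ T (some p) MJ m b = false := by
      intro m b hm hb; simp at hm hb
      simp [pvLtJ, hm, hb]
    have h10 : ∀ m b, (!pvJV (some p) MJ m) = true → (!pvJV (some p) MJ b) = false →
        pvLtJ T (some p) MJ m b = true := by
      intro m b hm hb; simp at hm hb
      simp [pvLtJ, hm, hb]
    have h00 : ∀ m b, (!pvJV (some p) MJ m) = false → (!pvJV (some p) MJ b) = false →
        pvLtJ T (some p) MJ m b = pvLtD T m b := by
      intro m b hm hb; simp at hm hb; simp [pvLtJ, hm, hb]
    have hfilt : (g :: r).filter (fun m => decide (|m - p| ≤ MJ))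
        = (g :: r).filter (fun m => !pvJV (some p) MJ m) := by
      apply List.filter_congr; intro m _; simp [pvJV, ← decide_not, not_lt]
    rw [stageMain (fun m => !pvJV (some p) MJ m) (pvLtD T) (pvLtJ T (some p) MJ) h11 h01 h10 h00 g r,
      ← hfilt]
    simp only [pvAFilterJump]
    cases hloc : (g :: r).filter (fun m => decide (|m - p| ≤ MJ)) with
    | nil =>
      simp only [List.isEmpty_nil, if_pos]
      rw [min?_cons]
      show mfold (fun m b => decide (|m - T| < |b - T|)) g r = _
      exact mfold_congr _ _ (fun m b => ltD_int_eq T m b) r g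
    | cons q s =>
      simp only [List.isEmpty_cons, Bool.false_eq_true, if_false]
      rw [min?_cons]
      show mfold (fun m b => decide (|m - T| < |b - T|)) q s = _
      exact mfold_congr _ _ (fun m b => ltD_int_eq T m b) s q

theorem boundsFilter (LB UB : Option Int) (l : List Int) :
    pvAFilterBounds l LB UB = l.filter (fun m => !pvBV LB UB m) := by
  cases LB with
  | none =>
    cases UB with
    | none => simp [pvAFilterBounds, pvBV]
    | some ub =>
      show l.filter (fun m => decide (m ≤ ub)) = _
      apply List.filter_congr; intro m _; simp [pvBV, ← decide_not, not_lt]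
  | some lb =>
    cases UB with
    | none =>
      show l.filter (fun m => decide (lb ≤ m)) = _
      apply List.filter_congr; intro m _; simp [pvBV, ← decide_not, not_lt]
    | some ub =>
      show (l.filter (fun m => decide (lb ≤ m))).filter (fun m => decide (m ≤ ub)) = _
      rw [List.filter_filter]
      apply List.filter_congr; intro m _
      simp [pvBV, ← decide_not, not_lt]
      exact Bool.and_comm _ _

theorem main_eq (candidates : List Int) (T : Int) (P : Option Int) (MJ : Int) (LB UB : Option Int) :
    choose_voice_pitch_py candidates T P MJ LB UB = choose_voice_pitch_py_alt candidates T P MJ LB UB := by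
  cases candidates with
  | nil => rfl
  | cons h t =>
    have h11 : ∀ m b, (!pvBV LB UB m) = true → (!pvBV LB UB b) = true →
        pvTupLt (pvPriority T P MJ LB UB m) (pvPriority T P MJ LB UB b) = pvLtJ T P MJ m b := by
      intro m b hm hb; simp at hm hb
      simp [pvTupLt, pvPriority, pvLtJ, pvLtD, hm, hb]
    have h01 : ∀ m b, (!pvBV LB UB m) = false → (!pvBV LB UB b) = true →
        pvTupLt (pvPriority T P MJ LB UB m) (pvPriority T P MJ LB UB b) = false := by
      intro m b hm hb; simp at hm hb
      simp [pvTupLt, pvPriority, hm, hb]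
    have h10 : ∀ m b, (!pvBV LB UB m) = true → (!pvBV LB UB b) = false →
        pvTupLt (pvPriority T P MJ LB UB m) (pvPriority T P MJ LB UB b) = true := by
      intro m b hm hb; simp at hm hb
      simp [pvTupLt, pvPriority, hm, hb]
    have h00 : ∀ m b, (!pvBV LB UB m) = false → (!pvBV LB UB b) = false →
        pvTupLt (pvPriority T P MJ LB UB m) (pvPriority T P MJ LB UB b) = pvLtJ T P MJ m b := by
      intro m b hm hb; simp at hm hb
      simp [pvTupLt, pvPriority, pvLtJ, pvLtD, hm, hb]
    have hB : choose_voice_pitch_py_alt (h :: t) T P MJ LB UB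
        = mfold (fun m b => pvTupLt (pvPriority T P MJ LB UB m) (pvPriority T P MJ LB UB b)) h t := rfl
    rw [hB, stageMain (fun m => !pvBV LB UB m) (pvLtJ T P MJ)
      (fun m b => pvTupLt (pvPriority T P MJ LB UB m) (pvPriority T P MJ LB UB b)) h11 h01 h10 h00 h t]
    show (match PySem.List.min?
        (pvAFilterJump (if (pvAFilterBounds (h :: t) LB UB).isEmpty then h :: t
          else pvAFilterBounds (h :: t) LB UB) P MJ) (fun m => |m - T|) with
      | some v => v
      | none => 0) = _
    rw [boundsFilter]
    cases hf : (h :: t).filter (fun m => !pvBV LB UB m) with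
    | nil =>
      simp only [List.isEmpty_nil, if_pos]
      exact jumpStage T P MJ h t
    | cons g r =>
      simp only [List.isEmpty_cons, Bool.false_eq_true, if_false]
      exact jumpStage T P MJ g r

-- ===== VERDICT (by name: the statement is the Claim_ definition above) =====
theorem choose_voice_pitch_py_spec : Claim_equal_choose_voice_pitch_py := by
  intro candidates target_midi prev_midi max_jump lower_bound upper_bound _
  exact main_eq candidates target_midi prev_midi max_jump lower_bound upper_bound
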